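-- pv_equiv track=rewrite | github.com/mahmoudgamal0/OnlineBookStore | book_model/views.py | call_procedure
-- ===== SOURCE A (Python) =====
-- def call_procedure(procedure_name,pram = None,out_pram = None):
--     sql = "CALL "+procedure_name+"("
--     if(pram != None):
--         for i in range(len(pram)):
--             sql += "'"
--             sql += pram[i]
--             sql += "'"
--             if(i != len(pram) - 1 or out_pram != None):
--                 sql += ","
--
--     if(out_pram != None):
--
--         for i in range(len(out_pram)):
--             sql += out_pram[i]
--             if (i != len(out_pram) - 1):
--                 sql += ","
--
--     sql += ");"
--     return sql
-- ===== SOURCE B (Python) =====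
-- def call_procedure(procedure_name, pram=None, out_pram=None):
--     parts = []
--     if pram is not None:
--         parts += ["'" + p + "'" for p in pram]
--     if out_pram is not None:
--         parts += list(out_pram)
--     return "CALL " + procedure_name + "(" + ",".join(parts) + ");"
-- ===== Notes on version B (the rewrite author's own statement) =====
-- stated objective: simpler
-- what changed: B collects quoted in-params and out-params into one fragment list and emits them with a single ','.join, removing A's string accumulator and all of its index/last-element/conditional-comma bookkeeping.
-- intended difference: When pram is a non-empty list and out_pram is the empty list, A emits a dangling comma after the last quoted parameter, producing an invalid CALL statement, while B omits that comma and returns the syntactically valid statement a maintainer intends. — e.g. on call_procedure("p", some ["a"], some []): A returns "CALL p('a',);", B returns "CALL p('a');"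
import Mathlib
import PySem

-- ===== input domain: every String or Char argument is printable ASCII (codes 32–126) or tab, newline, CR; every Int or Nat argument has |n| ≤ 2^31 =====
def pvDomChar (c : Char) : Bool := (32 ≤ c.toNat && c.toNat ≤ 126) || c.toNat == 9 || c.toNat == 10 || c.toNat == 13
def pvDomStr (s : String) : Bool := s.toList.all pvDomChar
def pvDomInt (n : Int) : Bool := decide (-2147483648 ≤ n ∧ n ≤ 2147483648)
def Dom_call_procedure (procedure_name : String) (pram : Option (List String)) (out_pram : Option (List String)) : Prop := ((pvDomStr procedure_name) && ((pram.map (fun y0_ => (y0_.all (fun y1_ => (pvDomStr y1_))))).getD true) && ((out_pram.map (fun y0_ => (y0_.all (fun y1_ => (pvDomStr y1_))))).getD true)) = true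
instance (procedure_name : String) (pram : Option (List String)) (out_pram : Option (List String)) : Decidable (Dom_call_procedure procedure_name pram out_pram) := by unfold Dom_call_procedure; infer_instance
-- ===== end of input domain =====

-- B replaces A's string accumulator and conditional-comma index bookkeeping by one ','.join over a
-- list of fragments (simpler); on a non-empty pram with out_pram = [] A emits a dangling comma and B does not.


-- ===== PORT A =====
def call_procedure (procedure_name : String) (pram : Option (List String)) (out_pram : Option (List String)) : String :=
  let sql := "CALL " ++ procedure_name ++ "("
  let sql :=
    match pram with
    | none => sql
    | some ps =>
      (PySem.List.pyRange 0 (ps.length : Int)).foldl (fun sql i =>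
        let sql := sql ++ "'"
        let sql := sql ++ PySem.List.pyGetD ps i ""
        let sql := sql ++ "'"
        if i ≠ (ps.length : Int) - 1 ∨ out_pram ≠ none then sql ++ "," else sql) sql
  let sql :=
    match out_pram with
    | none => sql
    | some os =>
      (PySem.List.pyRange 0 (os.length : Int)).foldl (fun sql i =>
        let sql := sql ++ PySem.List.pyGetD os i ""
        if i ≠ (os.length : Int) - 1 then sql ++ "," else sql) sql
  sql ++ ");"

-- ===== PORT B =====
def call_procedure_alt (procedure_name : String) (pram : Option (List String)) (out_pram : Option (List String)) : String :=
  let parts :=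
    (match pram with
     | none => ([] : List String)
     | some ps => ps.map (fun p => "'" ++ p ++ "'"))
    ++
    (match out_pram with
     | none => ([] : List String)
     | some os => os)
  "CALL " ++ procedure_name ++ "(" ++ PySem.Str.join "," parts ++ ");"

-- ===== PRECONDITION & SPEC =====
-- When pram is a non-empty list and out_pram is the empty list, A emits a dangling comma after the
-- last quoted parameter, producing an invalid CALL statement, while B omits that comma and returns
-- the syntactically valid statement a maintainer intends.
def D_call_procedure (procedure_name : String) (pram : Option (List String)) (out_pram : Option (List String)) : Prop :=
  pram.getD [] ≠ [] ∧ out_pram = some []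
instance (procedure_name : String) (pram : Option (List String)) (out_pram : Option (List String)) : Decidable (D_call_procedure procedure_name pram out_pram) := by unfold D_call_procedure; infer_instance

def Spec_call_procedure (procedure_name : String) (pram : Option (List String)) (out_pram : Option (List String)) (out : String) : Prop :=
  ¬ D_call_procedure procedure_name pram out_pram → out = call_procedure_alt procedure_name pram out_pram
instance (procedure_name : String) (pram : Option (List String)) (out_pram : Option (List String)) (out : String) : Decidable (Spec_call_procedure procedure_name pram out_pram out) := by unfold Spec_call_procedure; infer_instance

def pvDiffWitness_call_procedure : String × Option (List String) × Option (List String) := ("p", some ["a"], some [])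
def pvDiffWitnessOut_call_procedure : String × String := ("CALL p('a',);", "CALL p('a');")

-- ===== CLAIM (what is proved, stated in full; the proofs are below) =====
def Claim_unchanged_call_procedure : Prop := ∀ (procedure_name : String) (pram : Option (List String)) (out_pram : Option (List String)), Dom_call_procedure procedure_name pram out_pram → Spec_call_procedure procedure_name pram out_pram (call_procedure procedure_name pram out_pram)
def Claim_changed_call_procedure : Prop := Dom_call_procedure (pvDiffWitness_call_procedure.1) (pvDiffWitness_call_procedure.2.1) (pvDiffWitness_call_procedure.2.2) ∧ D_call_procedure (pvDiffWitness_call_procedure.1) (pvDiffWitness_call_procedure.2.1) (pvDiffWitness_call_procedure.2.2) ∧ call_procedure (pvDiffWitness_call_procedure.1) (pvDiffWitness_call_procedure.2.1) (pvDiffWitness_call_procedure.2.2) = pvDiffWitnessOut_call_procedure.1 ∧ call_procedure_alt (pvDiffWitness_call_procedure.1) (pvDiffWitness_call_procedure.2.1) (pvDiffWitness_call_procedure.2.2) = pvDiffWitnessOut_call_procedure.2 ∧ pvDiffWitnessOut_call_procedure.1 ≠ pvDiffWitnessOut_call_procedure.2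
def Claim_exact_call_procedure : Prop := ∀ (procedure_name : String) (pram : Option (List String)) (out_pram : Option (List String)), Dom_call_procedure procedure_name pram out_pram → D_call_procedure procedure_name pram out_pram → call_procedure procedure_name pram out_pram ≠ call_procedure_alt procedure_name pram out_pram

-- ===== LEMMAS AND PROOFS =====

-- strings are equal when their character lists are
theorem pv_toList_inj {s t : String} (h : s.toList = t.toList) : s = t := by
  have := congrArg String.ofList h
  rwa [String.ofList_toList, String.ofList_toList] at this

-- push .toList through a foldl whose body appends a chunk to the accumulator
theorem pv_toList_foldl {α : Type} (l : List α) (body : String → α → String)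
    (g : α → List Char) (hbody : ∀ s i, (body s i).toList = s.toList ++ g i) :
    ∀ s : String, (l.foldl body s).toList = s.toList ++ (l.map g).flatten := by
  induction l with
  | nil => intro s; simp
  | cons x l ih =>
    intro s
    simp only [List.foldl_cons, List.map_cons, List.flatten_cons, ih, hbody,
      List.append_assoc]

-- Chars.join over a cons with a non-empty tail
theorem pv_join_cons_ne (sep x : List Char) {l : List (List Char)} (h : l ≠ []) :
    PySem.Chars.join sep (x :: l) = x ++ sep ++ PySem.Chars.join sep l := by
  cases l with
  | nil => exact absurd rfl h
  | cons y l => exact PySem.Chars.join_cons_cons sep x y l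

-- Chars.join over an append with a non-empty right part
theorem pv_join_append (sep : List Char) (l m : List (List Char)) (hm : m ≠ []) :
    PySem.Chars.join sep (l ++ m)
      = (l.map (· ++ sep)).flatten ++ PySem.Chars.join sep m := by
  induction l with
  | nil => simp
  | cons x l ih =>
    have hlm : l ++ m ≠ [] := by
      intro h; exact hm (List.eq_nil_of_append_eq_nil h).2
    simp only [List.cons_append, pv_join_cons_ne sep x hlm, ih, List.map_cons,
      List.flatten_cons, List.append_assoc]

theorem pv_join_append_singleton (sep : List Char) (l : List (List Char)) (a : List Char) :
    PySem.Chars.join sep (l ++ [a]) = (l.map (· ++ sep)).flatten ++ a := by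
  rw [pv_join_append sep l [a] (by simp), PySem.Chars.join_singleton]

-- the range-indexed map of a function of pyGetD collapses to a map over the list
theorem pv_map_range (f : String → List Char) (xs : List String) :
    (PySem.List.pyRange 0 (xs.length : Int)).map (fun i => f (PySem.List.pyGetD xs i ""))
      = xs.map f := by
  have := PySem.List.map_pyGetD_pyRange_zero' xs ""
  calc (PySem.List.pyRange 0 (xs.length : Int)).map (fun i => f (PySem.List.pyGetD xs i ""))
      = ((PySem.List.pyRange 0 (xs.length : Int)).map
          (fun j => PySem.List.pyGetD xs j "")).map f := by
        rw [List.map_map]; rfl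
    _ = xs.map f := by rw [this]

-- A's loop chunks when the comma is appended on every iteration
theorem pv_range_all (f : String → List Char) (xs : List String) :
    (((PySem.List.pyRange 0 (xs.length : Int)).map
        (fun i => f (PySem.List.pyGetD xs i "") ++ [','])).flatten)
      = (xs.map (fun x => f x ++ [','])).flatten := by
  rw [pv_map_range (fun x => f x ++ [',']) xs]

-- A's loop chunks with the "no comma after the last element" test equal a ','-join
theorem pv_range_if (f : String → List Char) (xs : List String) :
    (((PySem.List.pyRange 0 (xs.length : Int)).map
        (fun i => f (PySem.List.pyGetD xs i "")
          ++ (if i ≠ (xs.length : Int) - 1 then [','] else []))).flatten)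
      = PySem.Chars.join [','] (xs.map f) := by
  induction xs using List.reverseRecOn with
  | nil => simp [PySem.List.pyRange_one_eq_nil, PySem.Chars.join_nil]
  | append_singleton xs x _ih =>
    have h0 : (0 : Int) ≤ (xs.length : Int) := Int.natCast_nonneg _
    have hlen : (((xs ++ [x]).length : Nat) : Int) = (xs.length : Int) + 1 := by
      simp
    rw [hlen, PySem.List.pyRange_one_succ_right h0, List.map_append, List.flatten_append]
    have hfirst : (PySem.List.pyRange 0 (xs.length : Int)).map
        (fun i => f (PySem.List.pyGetD (xs ++ [x]) i "")
          ++ (if i ≠ (xs.length : Int) + 1 - 1 then [','] else []))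
        = (PySem.List.pyRange 0 (xs.length : Int)).map
        (fun i => f (PySem.List.pyGetD xs i "") ++ [',']) := by
      apply List.map_congr_left
      intro i hi
      rcases PySem.List.mem_pyRange_one.mp hi with ⟨h1, h2⟩
      obtain ⟨k, rfl⟩ : ∃ k : Nat, i = (k : Int) := ⟨i.toNat, (Int.toNat_of_nonneg h1).symm⟩
      have hk : k < xs.length := by exact_mod_cast h2
      have hne : (k : Int) ≠ (xs.length : Int) + 1 - 1 := by omega
      rw [if_pos hne, PySem.List.pyGetD_natCast, PySem.List.pyGetD_natCast,
        List.getD_eq_getElem?_getD, List.getD_eq_getElem?_getD,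
        List.getElem?_append_left hk]
    rw [hfirst]
    have hlast : (List.map (fun i => f (PySem.List.pyGetD (xs ++ [x]) i "")
          ++ (if i ≠ (xs.length : Int) + 1 - 1 then [','] else [])) [(xs.length : Int)]).flatten
        = f x := by
      have hne : ¬ ((xs.length : Int) ≠ (xs.length : Int) + 1 - 1) := by omega
      simp only [List.map_cons, List.map_nil, List.flatten_cons, List.flatten_nil, if_neg hne,
        PySem.List.pyGetD_natCast, List.getD_eq_getElem?_getD, List.getElem?_concat_length]
      simp
    rw [hlast, pv_range_all, List.map_append, List.map_cons, List.map_nil,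
      pv_join_append_singleton, List.map_map]
    rfl

-- the quoted form of a parameter, as a character list
def pvQ (p : String) : List Char := '\'' :: (p.toList ++ ['\''])

-- characterizations of port A's output, one per shape of (pram, out_pram)
theorem pv_A_nn (n : String) :
    (call_procedure n none none).toList
      = ("CALL " ++ n ++ "(").toList ++ (");" : String).toList := by
  simp [call_procedure]

theorem pv_A_ns (n : String) (os : List String) :
    (call_procedure n none (some os)).toList
      = ("CALL " ++ n ++ "(").toList
        ++ (PySem.Chars.join [','] (os.map String.toList) ++ (");" : String).toList) := by
  simp only [call_procedure, String.toList_append]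
  rw [pv_toList_foldl _ _
      (fun i => (PySem.List.pyGetD os i "").toList
        ++ (if i ≠ (os.length : Int) - 1 then [','] else []))
      (by intro s i; split_ifs with h <;> simp [h])]
  rw [pv_range_if String.toList os]
  simp [List.append_assoc]

theorem pv_A_sn (n : String) (ps : List String) :
    (call_procedure n (some ps) none).toList
      = ("CALL " ++ n ++ "(").toList
        ++ (PySem.Chars.join [','] (ps.map pvQ) ++ (");" : String).toList) := by
  simp only [call_procedure, String.toList_append]
  rw [pv_toList_foldl _ _
      (fun i => pvQ (PySem.List.pyGetD ps i "")
        ++ (if i ≠ (ps.length : Int) - 1 then [','] else []))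
      (by intro s i; by_cases h : i = (ps.length : Int) - 1 <;>
        simp [h, pvQ, List.append_assoc])]
  rw [pv_range_if pvQ ps]
  simp [List.append_assoc]

theorem pv_A_ss (n : String) (ps os : List String) :
    (call_procedure n (some ps) (some os)).toList
      = ("CALL " ++ n ++ "(").toList
        ++ ((ps.map (fun p => pvQ p ++ [','])).flatten
          ++ (PySem.Chars.join [','] (os.map String.toList) ++ (");" : String).toList)) := by
  simp only [call_procedure, String.toList_append]
  rw [pv_toList_foldl _ _
      (fun i => (PySem.List.pyGetD os i "").toList
        ++ (if i ≠ (os.length : Int) - 1 then [','] else []))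
      (by intro s i; split_ifs with h <;> simp [h])]
  rw [pv_toList_foldl _ _
      (fun i => pvQ (PySem.List.pyGetD ps i "") ++ [','])
      (by intro s i
          rw [if_pos (Or.inr (by simp))]
          simp [pvQ, List.append_assoc])]
  rw [pv_range_if String.toList os, pv_range_all pvQ ps]
  simp [List.append_assoc]

-- characterization of port B's output
theorem pv_B (n : String) (pram out_pram : Option (List String)) :
    (call_procedure_alt n pram out_pram).toList
      = ("CALL " ++ n ++ "(").toList
        ++ (PySem.Chars.join [',']
              ((pram.getD []).map pvQ ++ (out_pram.getD []).map String.toList)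
          ++ (");" : String).toList) := by
  have hq : ∀ l : List String, l.map (String.toList ∘ fun p => ("'" ++ p ++ "'" : String)) = l.map pvQ :=
    fun l => List.map_congr_left (fun p _ => by simp [pvQ])
  cases pram <;> cases out_pram <;>
    simp [call_procedure_alt, PySem.Str.toList_join, List.map_map, hq,
      List.append_assoc]

-- dangling comma vs join: the flattened all-comma chunks are one character longer
theorem pv_len_flatten (f : String → List Char) (ps : List String) (h : ps ≠ []) :
    ((ps.map (fun p => f p ++ [','])).flatten).length
      = (PySem.Chars.join [','] (ps.map f)).length + 1 := by
  induction ps with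
  | nil => exact absurd rfl h
  | cons x l ih =>
    cases l with
    | nil => simp [PySem.Chars.join_singleton]
    | cons y l =>
      simp only [List.map_cons, PySem.Chars.join_cons_cons]
      simp only [List.map_cons, List.flatten_cons, List.length_append] at *
      rw [ih (by simp)]
      simp; omega

-- ===== VERDICT (by name: the statement is the Claim_ definition above) =====
theorem call_procedure_spec : Claim_unchanged_call_procedure := by
  intro n pram out_pram _hDom hD
  apply pv_toList_inj
  cases pram with
  | none =>
    cases out_pram with
    | none => rw [pv_A_nn, pv_B]; simp [PySem.Chars.join_nil]
    | some os => rw [pv_A_ns, pv_B]; simp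
  | some ps =>
    cases out_pram with
    | none => rw [pv_A_sn, pv_B]; simp
    | some os =>
      cases os with
      | nil =>
        have hps : ps = [] := by
          by_contra hne
          exact hD ⟨by simpa using hne, rfl⟩
        subst hps
        rw [pv_A_ss, pv_B]
        simp [PySem.Chars.join_nil]
      | cons o os' =>
        rw [pv_A_ss, pv_B]
        simp only [Option.getD_some]
        rw [pv_join_append [','] (ps.map pvQ) ((o :: os').map String.toList) (by simp),
          List.map_map]
        simp [List.append_assoc, Function.comp_def]

theorem call_procedure_changed : Claim_changed_call_procedure := by
  unfold Claim_changed_call_procedure; decide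

theorem call_procedure_tight : Claim_exact_call_procedure := by
  intro n pram out_pram _hDom hd heq
  obtain ⟨hne, hout⟩ := hd
  subst hout
  cases pram with
  | none => exact hne rfl
  | some ps =>
    have hps : ps ≠ [] := by simpa using hne
    have h := congrArg String.toList heq
    rw [pv_A_ss, pv_B] at h
    have hlen := congrArg List.length h
    simp only [List.length_append, List.map_nil, List.append_nil, Option.getD_some,
      PySem.Chars.join_nil] at hlen
    rw [pv_len_flatten pvQ ps hps] at hlen
    omega
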